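-- pv_equiv track=rewrite | github.com/pypi-data/pypi-mirror-369 | packages/odoc/odoc-0.7.0b1.tar.gz/odoc-0.7.0b1/src/odoc/calc_styles.py | escape_style_name
-- ===== SOURCE A (Python) =====
-- def escape_style_name(style_name):
--     ''' Non-alphanumeric characters are replaced by their hex-code
--     '''
--
--     def e_char(c):
--         num = ord(c)
--         if ((num >= 48 and num <= 57) or
--             (num >= 65 and num <= 90) or
--             (num >= 97 and num <= 122)):
--             return c
--
--         return f'_{hex(num).upper()[2:]}_'
--
--     return ''.join([e_char(C) for C in style_name])
-- ===== SOURCE B (Python) =====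
-- def escape_style_name(style_name):
--     ''' Non-alphanumeric characters are replaced by their hex-code '''
--     parts = []
--     i, n = 0, len(style_name)
--     while i < n:
--         j = i
--         while j < n and ('0' <= style_name[j] <= '9'
--                          or 'A' <= style_name[j] <= 'Z'
--                          or 'a' <= style_name[j] <= 'z'):
--             j += 1
--         parts.append(style_name[i:j])
--         if j < n:
--             parts.append('_%X_' % ord(style_name[j]))
--             j += 1
--         i = j
--     return ''.join(parts)
-- ===== Notes on version B (the rewrite author's own statement) =====
-- stated objective: alternative
-- what changed: Replaced the per-character helper mapped over every char and joined, with a run-based scanner that copies maximal alphanumeric runs as slices and formats each blocking character with printf-style uppercase-hex conversion instead of hex(n).upper() with the prefix sliced off.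
import Mathlib
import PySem

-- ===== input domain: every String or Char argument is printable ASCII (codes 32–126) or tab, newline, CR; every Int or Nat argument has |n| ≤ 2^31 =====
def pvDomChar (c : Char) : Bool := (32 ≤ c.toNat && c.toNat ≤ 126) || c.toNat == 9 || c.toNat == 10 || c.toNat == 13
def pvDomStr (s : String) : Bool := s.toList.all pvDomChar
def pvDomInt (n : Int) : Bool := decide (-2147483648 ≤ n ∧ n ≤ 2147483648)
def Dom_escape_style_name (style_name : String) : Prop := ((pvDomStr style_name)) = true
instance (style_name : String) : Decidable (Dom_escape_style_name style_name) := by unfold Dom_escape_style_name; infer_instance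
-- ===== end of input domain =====

-- B replaces A's per-character helper + join with a run-based scan (copy maximal
-- alphanumeric runs, escape the blocking char with printf-style uppercase hex); objective: alternative.

-- ===== PORT A =====
-- hex(n) for n ≥ 0: "0x" prefix plus lowercase hex digits ("0x0" for 0)
def pvLowHexDigit (d : Nat) : Char := Char.ofNat (if d < 10 then 48 + d else 87 + d)

def pvHexCoreA (n : Nat) : List Char :=
  if h : n = 0 then []
  else pvHexCoreA (n / 16) ++ [pvLowHexDigit (n % 16)]
termination_by n
decreasing_by exact Nat.div_lt_self (Nat.pos_of_ne_zero h) (by omega)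

def pvPyHex (n : Nat) : List Char :=
  '0' :: 'x' :: (if n = 0 then ['0'] else pvHexCoreA n)

-- e_char(c): keep alphanumerics, else f'_{hex(num).upper()[2:]}_'
def pvEChar (c : Char) : List Char :=
  let num := c.toNat
  if (48 ≤ num ∧ num ≤ 57) ∨ (65 ≤ num ∧ num ≤ 90) ∨ (97 ≤ num ∧ num ≤ 122) then
    [c]
  else
    '_' :: (((pvPyHex num).map Char.toUpper).drop 2) ++ ['_']

def escape_style_name (style_name : String) : String :=
  String.mk ((style_name.toList.map pvEChar).flatten)

-- ===== PORT B =====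
-- the inner while's guard: '0'<=c<='9' or 'A'<=c<='Z' or 'a'<=c<='z'
def pvIsAl (c : Char) : Bool :=
  ('0' ≤ c && c ≤ '9') || ('A' ≤ c && c ≤ 'Z') || ('a' ≤ c && c ≤ 'z')

-- printf-style uppercase-hex of n ≥ 0: uppercase hex digits, no prefix ("0" for 0)
def pvUpHexDigit (d : Nat) : Char := Char.ofNat (if d < 10 then 48 + d else 55 + d)

def pvHexCoreB (n : Nat) : List Char :=
  if h : n = 0 then []
  else pvHexCoreB (n / 16) ++ [pvUpHexDigit (n % 16)]
termination_by n
decreasing_by exact Nat.div_lt_self (Nat.pos_of_ne_zero h) (by omega)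

def pvFmtX (n : Nat) : List Char :=
  '_' :: (if n = 0 then ['0'] else pvHexCoreB n) ++ ['_']

-- outer while: emit the maximal alphanumeric run (the slice s[i:j]), then the
-- escaped blocking character, and continue after it
def pvBGo (l : List Char) : List Char :=
  match h : l.dropWhile pvIsAl with
  | [] => l.takeWhile pvIsAl
  | c :: t => l.takeWhile pvIsAl ++ pvFmtX c.toNat ++ pvBGo t
termination_by l.length
decreasing_by
  have := List.length_dropWhile_le (p := pvIsAl) (l := l)
  rw [h] at this; simp at this; omega

def escape_style_name_alt (style_name : String) : String :=
  String.mk (pvBGo style_name.toList)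

-- ===== PRECONDITION & SPEC =====
def Spec_escape_style_name (style_name : String) (out : String) : Prop := out = escape_style_name_alt style_name
instance (style_name : String) (out : String) : Decidable (Spec_escape_style_name style_name out) := by unfold Spec_escape_style_name; infer_instance

-- ===== CLAIM (what is proved, stated in full; the proofs are below) =====
def Claim_equal_escape_style_name : Prop := ∀ (style_name : String), Dom_escape_style_name style_name → Spec_escape_style_name style_name (escape_style_name style_name)

-- ===== LEMMAS AND PROOFS =====

-- the uppercased lowercase hex digits are the uppercase hex digits
theorem pv_upper_digit (d : Nat) (hd : d < 16) :
    Char.toUpper (pvLowHexDigit d) = pvUpHexDigit d := by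
  interval_cases d <;> decide

theorem pv_upper_core (n : Nat) :
    (pvHexCoreA n).map Char.toUpper = pvHexCoreB n := by
  induction n using Nat.strong_induction_on with
  | _ n ih =>
    rw [pvHexCoreA, pvHexCoreB]
    by_cases h : n = 0
    · simp [h]
    · simp only [h, dite_false, List.map_append, List.map_cons, List.map_nil]
      rw [ih (n / 16) (Nat.div_lt_self (Nat.pos_of_ne_zero h) (by omega)),
          pv_upper_digit (n % 16) (Nat.mod_lt _ (by omega))]

-- A's escaped form of a single char equals B's '%X' form
theorem pv_hex_eq (n : Nat) :
    (((pvPyHex n).map Char.toUpper).drop 2) = if n = 0 then ['0'] else pvHexCoreB n := by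
  by_cases h : n = 0 <;> simp [pvPyHex, h, pv_upper_core]

-- B's guard coincides with A's numeric condition
theorem pv_guard_iff (c : Char) :
    pvIsAl c = true ↔
      ((48 ≤ c.toNat ∧ c.toNat ≤ 57) ∨ (65 ≤ c.toNat ∧ c.toNat ≤ 90) ∨
       (97 ≤ c.toNat ∧ c.toNat ≤ 122)) := by
  simp only [pvIsAl, Bool.or_eq_true, Bool.and_eq_true, decide_eq_true_eq,
    Char.le_def, UInt32.le_iff_toNat_le]
  simp only [Char.toNat]
  have h0 : '0'.val.toNat = 48 := rfl
  have h9 : '9'.val.toNat = 57 := rfl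
  have hA : 'A'.val.toNat = 65 := rfl
  have hZ : 'Z'.val.toNat = 90 := rfl
  have ha : 'a'.val.toNat = 97 := rfl
  have hz : 'z'.val.toNat = 122 := rfl
  rw [h0, h9, hA, hZ, ha, hz]
  tauto

theorem pv_eChar_of_al {c : Char} (h : pvIsAl c = true) : pvEChar c = [c] := by
  rw [pvEChar]
  simp [(pv_guard_iff c).mp h]

theorem pv_eChar_of_not_al {c : Char} (h : pvIsAl c = false) :
    pvEChar c = pvFmtX c.toNat := by
  have hnc : ¬ ((48 ≤ c.toNat ∧ c.toNat ≤ 57) ∨ (65 ≤ c.toNat ∧ c.toNat ≤ 90) ∨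
      (97 ≤ c.toNat ∧ c.toNat ≤ 122)) := by
    intro hc; rw [← pv_guard_iff c] at hc; simp [h] at hc
  rw [pvEChar]
  simp only [hnc, if_false, pvFmtX, pv_hex_eq]

theorem pv_flatten_al (l : List Char) (h : ∀ c ∈ l, pvIsAl c = true) :
    (l.map pvEChar).flatten = l := by
  induction l with
  | nil => rfl
  | cons c t ih =>
    simp only [List.map_cons, List.flatten_cons,
      pv_eChar_of_al (h c (List.mem_cons_self)), List.cons_append, List.nil_append]
    rw [ih (fun x hx => h x (List.mem_cons_of_mem _ hx))]

theorem pv_dropWhile_head_false (l : List Char) (c : Char) (t : List Char)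
    (h : l.dropWhile pvIsAl = c :: t) : pvIsAl c = false := by
  induction l with
  | nil => simp at h
  | cons x xs ih =>
    rw [List.dropWhile_cons] at h
    by_cases hx : pvIsAl x
    · exact ih (by simpa [hx] using h)
    · simp [hx] at h
      rcases h with ⟨h1, _⟩
      rw [← h1]; simp [hx]

theorem pv_bGo_eq_aux : ∀ (n : Nat) (l : List Char), l.length = n →
    pvBGo l = (l.map pvEChar).flatten := by
  intro n
  induction n using Nat.strong_induction_on with
  | _ n ih =>
    intro l hl
    rw [pvBGo]
    cases h : l.dropWhile pvIsAl with
    | nil =>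
      conv_rhs => rw [← List.takeWhile_append_dropWhile (p := pvIsAl) (l := l)]
      rw [h, List.append_nil,
        pv_flatten_al _ (fun c hc => List.mem_takeWhile_imp hc)]
    | cons c t =>
      have hlen : t.length < l.length := by
        have := List.length_dropWhile_le (p := pvIsAl) (l := l)
        rw [h] at this; simp at this; omega
      have hc : pvIsAl c = false := pv_dropWhile_head_false l c t h
      conv_rhs => rw [← List.takeWhile_append_dropWhile (p := pvIsAl) (l := l)]
      rw [h]
      simp only [List.map_append, List.flatten_append, List.map_cons, List.flatten_cons]
      rw [pv_flatten_al _ (fun x hx => List.mem_takeWhile_imp hx),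
        pv_eChar_of_not_al hc, ih t.length (by omega) t rfl, List.append_assoc]

theorem pv_bGo_eq (l : List Char) : pvBGo l = (l.map pvEChar).flatten :=
  pv_bGo_eq_aux l.length l rfl

-- ===== VERDICT (by name: the statement is the Claim_ definition above) =====
theorem escape_style_name_spec : Claim_equal_escape_style_name := by
  intro s _
  unfold Spec_escape_style_name escape_style_name escape_style_name_alt
  rw [pv_bGo_eq]
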